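-- pv_equiv track=rewrite | github.com/Christopher831/optpick | algorithm.py | _build_j_subset_index
-- ===== SOURCE A (Python) =====
-- from itertools import combinations
--
-- def _combo_mask(items):
--     mask = 0
--     for item in items:
--         mask |= 1 << item
--     return mask
--
-- def _build_j_subset_index(n, j):
--     j_subsets = []
--     j_index = {}
--     for idx, combo in enumerate(combinations(range(n), j)):
--         mask = _combo_mask(combo)
--         j_subsets.append(mask)
--         j_index[mask] = idx
--     return j_subsets, j_index
-- ===== SOURCE B (Python) =====
-- def _build_j_subset_index(n, j):
--     j_subsets = []
--     j_index = {}
--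
--     def rec(start, remaining, mask):
--         if remaining == 0:
--             j_index[mask] = len(j_subsets)
--             j_subsets.append(mask)
--             return
--         for i in range(start, n - remaining + 1):
--             rec(i + 1, remaining - 1, mask | (1 << i))
--
--     rec(0, j, 0)
--     return j_subsets, j_index
-- ===== Notes on version B (the rewrite author's own statement) =====
-- stated objective: alternative
-- what changed: Replaces itertools.combinations plus a per-combination mask-building loop with a single recursive descent that threads the partial bitmask, emitting each subset's mask directly in the same lexicographic order.
import Mathlib
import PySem

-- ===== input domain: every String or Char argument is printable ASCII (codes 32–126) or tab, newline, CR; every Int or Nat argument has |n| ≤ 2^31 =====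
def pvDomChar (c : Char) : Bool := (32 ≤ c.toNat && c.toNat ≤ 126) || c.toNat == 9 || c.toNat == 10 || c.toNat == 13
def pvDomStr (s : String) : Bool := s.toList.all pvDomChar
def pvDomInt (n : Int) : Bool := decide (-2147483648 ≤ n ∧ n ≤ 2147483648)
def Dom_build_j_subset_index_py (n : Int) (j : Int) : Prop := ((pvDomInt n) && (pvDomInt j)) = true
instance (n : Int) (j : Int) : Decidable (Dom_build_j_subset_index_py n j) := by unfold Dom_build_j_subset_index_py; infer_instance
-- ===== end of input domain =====

-- B replaces itertools.combinations + a per-combo mask loop by one recursive descent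
-- threading the partial bitmask (alternative decomposition, same cost).

-- ===== PORT A =====
-- '1 << item': items here are ≥ 0 (they come from range), where 1 <<< item.toNat is exact
def pvBit (i : Int) : Int := (1 : Int) <<< i.toNat

-- itertools.combinations(pool, r) in lexicographic order (hand port; PySem has no combinations).
-- The guard mirrors combinations' own short-circuit 'if r > n: return' (it yields nothing when
-- r exceeds the pool length); both branches below agree with the unguarded recursion.
def pyCombinations {α : Type} : List α → Nat → List (List α)
  | _, 0 => [[]]
  | [], _ + 1 => []
  | x :: xs, r + 1 =>
      if xs.length < r then []
      else ((pyCombinations xs r).map (fun c => x :: c)) ++ pyCombinations xs (r + 1)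

-- _combo_mask: items come from range(n), hence are ≥ 0, so '1 << item' = 1 <<< item.toNat (exact there)
def combo_mask_py (items : List Int) : Int :=
  items.foldl (fun mask item => PySem.Int.bor mask (pvBit item)) 0

def build_j_subset_index_py (n : Int) (j : Int) : List Int × (List (Int × Int)) :=
  let st :=
    (PySem.List.enumerate (pyCombinations (PySem.List.pyRange 0 n 1) j.toNat)).foldl
      (fun (st : List Int × PySem.Dict Int Int) p =>
        let mask := combo_mask_py p.2
        (st.1 ++ [mask], st.2.insert mask p.1))
      ([], PySem.Dict.empty)
  (st.1, st.2.items)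

-- ===== PORT B =====
-- rec(start, remaining, mask) of Source B; remaining is a Nat since Pre_ gives 0 ≤ j
def pvRecB (n : Int) : Nat → Int → Int → (List Int × PySem.Dict Int Int) → (List Int × PySem.Dict Int Int)
  | 0, _start, mask, st => (st.1 ++ [mask], st.2.insert mask (st.1.length : Int))
  | r + 1, start, mask, st =>
      (PySem.List.pyRange start (n - ((r : Int) + 1) + 1) 1).foldl
        (fun st i => pvRecB n r (i + 1) (PySem.Int.bor mask (pvBit i)) st) st

def build_j_subset_index_py_alt (n : Int) (j : Int) : List Int × (List (Int × Int)) :=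
  let st := pvRecB n j.toNat 0 0 ([], PySem.Dict.empty)
  (st.1, st.2.items)

-- ===== PRECONDITION & SPEC =====
-- Python A raises ValueError (combinations with negative r) exactly when j < 0; B does not return there either.
def Pre_build_j_subset_index_py (n : Int) (j : Int) : Prop := 0 ≤ j
instance (n : Int) (j : Int) : Decidable (Pre_build_j_subset_index_py n j) := by unfold Pre_build_j_subset_index_py; infer_instance
def pvWitness_build_j_subset_index_py : Int × Int := (4, 2)

def Spec_build_j_subset_index_py (n : Int) (j : Int) (out : List Int × (List (Int × Int))) : Prop := out = build_j_subset_index_py_alt n j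
instance (n : Int) (j : Int) (out : List Int × (List (Int × Int))) : Decidable (Spec_build_j_subset_index_py n j out) := by unfold Spec_build_j_subset_index_py; infer_instance

-- ===== CLAIM (what is proved, stated in full; the proofs are below) =====
def Claim_equal_build_j_subset_index_py : Prop := ∀ (n : Int) (j : Int), Dom_build_j_subset_index_py n j → Pre_build_j_subset_index_py n j → Spec_build_j_subset_index_py n j (build_j_subset_index_py n j)

-- ===== LEMMAS AND PROOFS =====

theorem pvPyRange_one_nil {a b : Int} (h : b ≤ a) : PySem.List.pyRange a b 1 = [] := by
  rw [PySem.List.pyRange_one]; simp; omega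

-- the masks B's rec emits, in order (proof-side description of pvRecB's emission sequence)
def pvEmit (n : Int) : Nat → Int → Int → List Int
  | 0, _start, mask => [mask]
  | r + 1, start, mask =>
      (PySem.List.pyRange start (n - ((r : Int) + 1) + 1) 1).flatMap
        (fun i => pvEmit n r (i + 1) (PySem.Int.bor mask (pvBit i)))

-- the common per-mask state step (append + dict assignment at the current length)
def pvStep (st : List Int × PySem.Dict Int Int) (m : Int) : List Int × PySem.Dict Int Int :=
  (st.1 ++ [m], st.2.insert m (st.1.length : Int))

theorem pvFoldl_flatMap {α β σ : Type} (g : α → List β) (f : σ → β → σ) :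
    ∀ (l : List α) (st : σ), (l.flatMap g).foldl f st = l.foldl (fun st x => (g x).foldl f st) st := by
  intro l
  induction l with
  | nil => intro st; rfl
  | cons x xs ih => intro st; simp [List.flatMap_cons, List.foldl_append, ih]

theorem pvRecB_eq_foldl_emit (n : Int) :
    ∀ (r : Nat) (start mask : Int) (st : List Int × PySem.Dict Int Int),
      pvRecB n r start mask st = (pvEmit n r start mask).foldl pvStep st := by
  intro r
  induction r with
  | zero => intro start mask st; rfl
  | succ r ih =>
      intro start mask st
      show (PySem.List.pyRange start (n - ((r : Int) + 1) + 1) 1).foldl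
          (fun st i => pvRecB n r (i + 1) (PySem.Int.bor mask (pvBit i)) st) st
        = _
      rw [pvEmit, pvFoldl_flatMap]
      apply PySem.List.foldl_congr_mem
      intro st' i _
      exact ih (i + 1) _ st'

theorem pvCombos_nil_of_short {α : Type} :
    ∀ (L : List α) (k : Nat), L.length < k → pyCombinations L k = [] := by
  intro L
  induction L with
  | nil => intro k hk; cases k with
      | zero => omega
      | succ k => rfl
  | cons x xs ih =>
      intro k hk
      cases k with
      | zero => omega
      | succ k =>
          simp only [pyCombinations]
          rw [if_pos (show xs.length < k by simp only [List.length_cons] at hk; omega)]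

-- lex structure of combinations of a contiguous integer range
theorem pvCombos_range_succ (n : Int) (r : Nat) :
    ∀ (fuel : Nat) (start : Int), (n - start).toNat ≤ fuel →
      pyCombinations (PySem.List.pyRange start n 1) (r + 1)
        = (PySem.List.pyRange start (n - (r : Int)) 1).flatMap
            (fun i => (pyCombinations (PySem.List.pyRange (i + 1) n 1) r).map (fun c => i :: c)) := by
  intro fuel
  induction fuel with
  | zero =>
      intro start h
      have h1 : n ≤ start := by omega
      rw [pvPyRange_one_nil h1, pvPyRange_one_nil (show n - (r : Int) ≤ start by omega)]
      rfl
  | succ fuel ih =>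
      intro start h
      by_cases hlt : start < n - (r : Int)
      · have hsn : start < n := by omega
        rw [PySem.List.pyRange_one_cons hsn, PySem.List.pyRange_one_cons hlt]
        simp only [pyCombinations, List.flatMap_cons]
        rw [if_neg (show ¬ (PySem.List.pyRange (start + 1) n 1).length < r by
              rw [PySem.List.length_pyRange_one]; omega)]
        have hfuel : (n - (start + 1)).toNat ≤ fuel := by omega
        rw [ih (start + 1) hfuel]
      · have h2 : n - (r : Int) ≤ start := by omega
        rw [pvPyRange_one_nil h2, List.flatMap_nil]
        apply pvCombos_nil_of_short
        rw [PySem.List.length_pyRange_one]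
        omega

-- threading the partial mask through the descent = folding each full combination from that mask
theorem pvEmit_eq_map_combos (n : Int) :
    ∀ (r : Nat) (start mask : Int),
      pvEmit n r start mask
        = (pyCombinations (PySem.List.pyRange start n 1) r).map
            (fun c => c.foldl (fun m i => PySem.Int.bor m (pvBit i)) mask) := by
  intro r
  induction r with
  | zero => intro start mask; simp [pvEmit, pyCombinations]
  | succ r ih =>
      intro start mask
      rw [pvEmit, pvCombos_range_succ n r (n - start).toNat start (le_refl _)]
      have hr : n - ((r : Int) + 1) + 1 = n - (r : Int) := by ring
      rw [hr, List.map_flatMap]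
      apply List.flatMap_congr
      intro i _
      rw [ih (i + 1) (PySem.Int.bor mask (pvBit i)), List.map_map]
      exact List.map_congr_left (fun c _ => rfl)

-- A's enumerate-indexed fold is the same pvStep fold once the index equals the current length
theorem pvFoldA_eq_foldl_step :
    ∀ (cs : List (List Int)) (s : Int) (st : List Int × PySem.Dict Int Int),
      (st.1.length : Int) = s →
      (PySem.List.enumerate cs s).foldl
          (fun (st : List Int × PySem.Dict Int Int) p =>
            let mask := combo_mask_py p.2
            (st.1 ++ [mask], st.2.insert mask p.1)) st
        = (cs.map combo_mask_py).foldl pvStep st := by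
  intro cs
  induction cs with
  | nil => intro s st _; rfl
  | cons c cs ih =>
      intro s st hs
      rw [PySem.List.enumerate_cons, List.map_cons, List.foldl_cons, List.foldl_cons]
      have hstep : (let mask := combo_mask_py c; (st.1 ++ [mask], st.2.insert mask s))
          = pvStep st (combo_mask_py c) := by
        simp [pvStep, hs]
      rw [hstep]
      exact ih (s + 1) _ (by simp [pvStep, hs])

-- ===== VERDICT (by name: the statement is the Claim_ definition above) =====
theorem build_j_subset_index_py_spec : Claim_equal_build_j_subset_index_py := by
  intro n j _ _
  show build_j_subset_index_py n j = build_j_subset_index_py_alt n j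
  unfold build_j_subset_index_py build_j_subset_index_py_alt
  rw [pvFoldA_eq_foldl_step _ 0 _ (by rfl),
      pvRecB_eq_foldl_emit, pvEmit_eq_map_combos]
  rfl
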